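-- pv_equiv track=rewrite | github.com/comp-think/2020-2021 | docs/laboratory/src/lessons/3/ex_1.py | all_before_lab_n
-- ===== SOURCE A (Python) =====
-- def all_before_lab_n(a_list,n):
--     result = []
--
--     i = 0
--     count_lab = 0
--     while count_lab < n:
--         title = a_list[i]
--         result.append(title)
--         if title == "Laboratory":
--             count_lab += 1
--         i += 1
--
--     return result
-- ===== SOURCE B (Python) =====
-- def all_before_lab_n(a_list, n):
--     if n <= 0:
--         return []
--     count = 0
--     for i, title in enumerate(a_list):
--         if title == "Laboratory":
--             count += 1
--             if count == n:
--                 return a_list[:i + 1]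
--     return list(a_list)
-- ===== Notes on version B (the rewrite author's own statement) =====
-- stated objective: simpler
-- what changed: B replaces A's while-loop with manual indexing, appending and a mutable marker counter by a single for/enumerate scan that returns the slice a_list[:i+1] at the n-th 'Laboratory' marker; where A would run past the end of the list, B returns the whole list.
import Mathlib
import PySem

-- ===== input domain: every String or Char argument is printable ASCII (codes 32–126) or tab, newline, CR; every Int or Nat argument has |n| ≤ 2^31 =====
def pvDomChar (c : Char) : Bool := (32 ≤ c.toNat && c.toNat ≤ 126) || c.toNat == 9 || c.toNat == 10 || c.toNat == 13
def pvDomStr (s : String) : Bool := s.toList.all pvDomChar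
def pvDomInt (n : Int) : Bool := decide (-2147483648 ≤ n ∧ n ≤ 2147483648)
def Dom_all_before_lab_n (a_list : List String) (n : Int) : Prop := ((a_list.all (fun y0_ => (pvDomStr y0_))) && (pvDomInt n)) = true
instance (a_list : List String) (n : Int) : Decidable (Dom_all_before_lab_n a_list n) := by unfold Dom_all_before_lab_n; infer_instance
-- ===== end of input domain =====

-- B replaces A's while-loop (manual index, append-built result, marker counter) by a single
-- enumerate scan returning the slice a_list[:i+1] at the n-th 'Laboratory'; same value wherever A returns.

-- ===== PORT A =====
-- while count_lab < n: title = a_list[i]; result.append(title); if title == "Laboratory": count_lab += 1; i += 1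
-- a_list[i] is PySem.List.pyGet?; the 'none' arm is Python's IndexError (excluded by Pre_).
def aLoop (a_list : List String) (n : Int) (result : List String) (i : Nat) (count_lab : Int) : List String :=
  if count_lab < n then
    match h : PySem.List.pyGet? a_list (i : Int) with
    | none => result   -- IndexError in Python; unreachable under Pre_
    | some title =>
        aLoop a_list n (result ++ [title]) (i + 1)
          (if title = "Laboratory" then count_lab + 1 else count_lab)
  else result
termination_by a_list.length - i
decreasing_by
  simp only [PySem.List.pyGet?_natCast] at h
  have : i < a_list.length := by
    by_contra hge
    rw [List.getElem?_eq_none (by omega)] at h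
    simp at h
  omega

def all_before_lab_n (a_list : List String) (n : Int) : List String :=
  aLoop a_list n [] 0 0

-- ===== PORT B =====
-- for i, title in enumerate(a_list): count an occurrence; at count == n return a_list[:i+1];
-- fall-through returns list(a_list).
def bLoop (a_list : List String) (n : Int) (rest : List String) (i : Nat) (count : Int) : List String :=
  match rest with
  | [] => a_list                      -- list(a_list): a copy of the whole list
  | title :: ts =>
    if title = "Laboratory" then
      if count + 1 = n then
        PySem.List.slice a_list none (some ((i : Int) + 1))   -- a_list[:i+1]
      else bLoop a_list n ts (i + 1) (count + 1)
    else bLoop a_list n ts (i + 1) count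

def all_before_lab_n_alt (a_list : List String) (n : Int) : List String :=
  if n ≤ 0 then [] else bLoop a_list n a_list 0 0

-- ===== PRECONDITION & SPEC =====
-- Pre_ excludes exactly the inputs where A raises IndexError: n ≥ 1 but the list holds fewer
-- than n occurrences of "Laboratory" (A walks off the end of the list).
def Pre_all_before_lab_n (a_list : List String) (n : Int) : Prop :=
  n ≤ 0 ∨ n ≤ (a_list.count "Laboratory" : Int)
instance (a_list : List String) (n : Int) : Decidable (Pre_all_before_lab_n a_list n) := by
  unfold Pre_all_before_lab_n; infer_instance

def pvWitness_all_before_lab_n : List String × Int := (["Lecture", "Laboratory", "Exam"], 1)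

def Spec_all_before_lab_n (a_list : List String) (n : Int) (out : List String) : Prop := out = all_before_lab_n_alt a_list n
instance (a_list : List String) (n : Int) (out : List String) : Decidable (Spec_all_before_lab_n a_list n out) := by unfold Spec_all_before_lab_n; infer_instance

-- ===== CLAIM (what is proved, stated in full; the proofs are below) =====
def Claim_equal_all_before_lab_n : Prop := ∀ (a_list : List String) (n : Int), Dom_all_before_lab_n a_list n → Pre_all_before_lab_n a_list n → Spec_all_before_lab_n a_list n (all_before_lab_n a_list n)

-- ===== LEMMAS AND PROOFS =====

-- Loop correspondence: at position i with `rest` the remaining suffix, A's accumulated result is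
-- the prefix already scanned, and enough markers remain for both loops to stop at the same index.
lemma aLoop_eq_bLoop (a_list : List String) (n : Int) :
    ∀ (rest : List String) (i : Nat) (count : Int),
      a_list.drop i = rest →
      count < n →
      n ≤ count + (rest.count "Laboratory" : Int) →
      aLoop a_list n (a_list.take i) i count = bLoop a_list n rest i count := by
  intro rest
  induction rest with
  | nil =>
    intro i count _ hlt hle
    simp only [List.count_nil, Nat.cast_zero, add_zero] at hle
    omega
  | cons title ts ih =>
    intro i count hdrop hlt hle
    have hget : a_list[i]? = some title := by
      have h0 : (a_list.drop i)[0]? = a_list[i + 0]? := List.getElem?_drop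
      rw [hdrop] at h0
      simpa using h0.symm
    have hdrop' : a_list.drop (i + 1) = ts := by
      have h1 : List.drop 1 (List.drop i a_list) = List.drop (i + 1) a_list := List.drop_drop
      rw [hdrop] at h1
      simpa using h1.symm
    have htake : a_list.take (i + 1) = a_list.take i ++ [title] := by
      rw [List.take_add_one, hget]; rfl
    rw [aLoop, if_pos hlt]
    split
    case _ heq =>
      rw [PySem.List.pyGet?_natCast, hget] at heq
      exact absurd heq (by simp)
    case _ t heq =>
      rw [PySem.List.pyGet?_natCast, hget] at heq
      obtain rfl : title = t := by injection heq
      by_cases hlab : title = "Laboratory"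
      · subst hlab
        simp only [if_true]
        by_cases hn : count + 1 = n
        · -- both stop here: A returns take i ++ [title], B returns a_list[:i+1]
          simp only [bLoop, if_true, if_pos hn]
          rw [aLoop]
          have : ¬ (count + 1 < n) := by omega
          rw [if_neg this]
          rw [PySem.List.slice_to a_list (by omega : (0:Int) ≤ (i:Int) + 1)]
          have : ((i : Int) + 1).toNat = i + 1 := by omega
          rw [this, ← htake]
        · simp only [bLoop, if_true, if_neg hn]
          rw [← htake]
          apply ih (i + 1) (count + 1) hdrop' (by omega)
          simp only [List.count_cons_self] at hle
          push_cast at hle ⊢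
          omega
      · simp only [if_neg hlab, bLoop, ← htake]
        apply ih (i + 1) count hdrop' hlt
        rw [List.count_cons_of_ne (by simpa using hlab)] at hle
        exact hle

-- ===== VERDICT (by name: the statement is the Claim_ definition above) =====
theorem all_before_lab_n_spec : Claim_equal_all_before_lab_n := by
  intro a_list n _ hpre
  unfold Spec_all_before_lab_n all_before_lab_n all_before_lab_n_alt
  by_cases hn : n ≤ 0
  · rw [if_pos hn, aLoop, if_neg (by omega : ¬ ((0:Int) < n))]
  · rw [if_neg hn]
    have hle : n ≤ (a_list.count "Laboratory" : Int) := by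
      rcases hpre with h | h
      · omega
      · exact h
    have := aLoop_eq_bLoop a_list n a_list 0 0 (by simp) (by omega) (by omega)
    simpa using this
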